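-- pv_equiv track=rewrite | github.com/merciamarquesdev/Algorithms-Development-and-Implementation---Beecrowd-Challenges | semana1/origami.py | metodo2
-- ===== SOURCE A (Python) =====
-- def metodo2(a,b):
--     if (a >= b):
--         while (b > 0):
--             if (b*4 <= a):
--                 resultado = b
--                 break
--             else:
--                 b -= 1
--
--     else:
--         while (a > 0):
--             if (a*4 <= b):
--                 resultado = a
--                 break
--             else:
--                 a -= 1
--     return resultado
-- ===== SOURCE B (Python) =====
-- def metodo2(a, b):
--     # closed form: the largest k <= min(a,b) with 4*k <= max(a,b)
--     return min(min(a, b), max(a, b) // 4)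
-- ===== Notes on version B (the rewrite author's own statement) =====
-- stated objective: faster
-- what changed: Replaced the decrement-until-fit while loop by the closed form min(min(a,b), max(a,b)//4).
import Mathlib
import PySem

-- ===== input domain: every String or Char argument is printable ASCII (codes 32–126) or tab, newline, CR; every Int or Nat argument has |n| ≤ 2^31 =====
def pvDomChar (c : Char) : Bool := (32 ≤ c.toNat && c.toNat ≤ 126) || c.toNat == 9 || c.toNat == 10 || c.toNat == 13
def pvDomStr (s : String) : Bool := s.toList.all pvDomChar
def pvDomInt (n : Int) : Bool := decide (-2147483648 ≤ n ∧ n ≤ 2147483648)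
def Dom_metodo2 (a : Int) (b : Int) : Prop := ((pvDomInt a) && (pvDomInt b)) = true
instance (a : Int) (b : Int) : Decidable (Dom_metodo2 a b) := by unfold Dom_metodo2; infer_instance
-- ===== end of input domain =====

-- B replaces A's decrement-until-fit loop by the closed form min(min a b, max a b // 4): O(1) instead of O(min(a,b)).

-- ===== PORT A =====
-- A's two while loops are the same loop with the roles of a,b swapped: while small > 0,
-- return small as soon as small*4 ≤ big, else small -= 1. If the loop exhausts, Python
-- raises UnboundLocalError (resultado unset); such inputs are outside Pre_metodo2 and the
-- port returns 0 there. Fuel small.toNat + 1 covers every iteration the Python loop makes.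
def metodo2Loop (big : Int) (small : Int) : Nat → Int
  | 0 => 0
  | Nat.succ n =>
    if small > 0 then
      (if small * 4 ≤ big then small else metodo2Loop big (small - 1) n)
    else 0

def metodo2 (a : Int) (b : Int) : Int :=
  if a ≥ b then metodo2Loop a b (b.toNat + 1)
  else metodo2Loop b a (a.toNat + 1)

-- ===== PORT B =====
def metodo2_alt (a : Int) (b : Int) : Int :=
  min (min a b) (PySem.Int.floordiv (max a b) 4)

-- ===== PRECONDITION & SPEC =====
-- Pre_ excludes exactly the inputs on which A raises UnboundLocalError (its loop runs out
-- without ever setting resultado): min(a,b) ≤ 0 or max(a,b) < 4.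
def Pre_metodo2 (a : Int) (b : Int) : Prop := 1 ≤ min a b ∧ 4 ≤ max a b
instance (a : Int) (b : Int) : Decidable (Pre_metodo2 a b) := by unfold Pre_metodo2; infer_instance
def pvWitness_metodo2 : Int × Int := (10, 3)

def Spec_metodo2 (a : Int) (b : Int) (out : Int) : Prop := out = metodo2_alt a b
instance (a : Int) (b : Int) (out : Int) : Decidable (Spec_metodo2 a b out) := by unfold Spec_metodo2; infer_instance

-- ===== CLAIM (what is proved, stated in full; the proofs are below) =====
def Claim_equal_metodo2 : Prop := ∀ (a : Int) (b : Int), Dom_metodo2 a b → Pre_metodo2 a b → Spec_metodo2 a b (metodo2 a b)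

-- ===== LEMMAS AND PROOFS =====

-- The loop computes min small (big // 4) whenever it terminates by break:
-- 1 ≤ small, 4 ≤ big, and the fuel covers small.
theorem metodo2Loop_eq (big : Int) (hbig : 4 ≤ big) :
    ∀ (fuel : Nat) (small : Int), 1 ≤ small → small.toNat ≤ fuel →
      metodo2Loop big small fuel = min small (PySem.Int.floordiv big 4) := by
  intro fuel
  induction fuel with
  | zero => intro small h1 h2; omega
  | succ n ih =>
    intro small h1 h2
    have hq : PySem.Int.floordiv big 4 * 4 + PySem.Int.mod big 4 = big :=
      PySem.Int.floordiv_mul_add_mod big 4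
    have hm : 0 ≤ PySem.Int.mod big 4 ∧ PySem.Int.mod big 4 < 4 := by
      constructor
      · exact PySem.Int.mod_nonneg big (by omega)
      · exact PySem.Int.mod_lt big (by omega)
    simp only [metodo2Loop, if_pos (by omega : small > 0)]
    by_cases hle : small * 4 ≤ big
    · rw [if_pos hle]
      have : small ≤ PySem.Int.floordiv big 4 := by nlinarith
      omega
    · rw [if_neg hle]
      have hqlt : PySem.Int.floordiv big 4 < small := by nlinarith
      have hq1 : 1 ≤ PySem.Int.floordiv big 4 := by nlinarith
      rw [ih (small - 1) (by omega) (by omega)]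
      omega

theorem metodo2_eq_closed (a b : Int) (h : Pre_metodo2 a b) :
    metodo2 a b = metodo2_alt a b := by
  obtain ⟨h1, h4⟩ := h
  unfold metodo2 metodo2_alt
  by_cases hab : a ≥ b
  · rw [if_pos hab, metodo2Loop_eq a (by omega) (b.toNat + 1) b (by omega) (by omega),
        max_eq_left (by omega : b ≤ a), min_eq_right (by omega : b ≤ a)]
  · rw [if_neg hab, metodo2Loop_eq b (by omega) (a.toNat + 1) a (by omega) (by omega),
        max_eq_right (by omega : a ≤ b), min_eq_left (by omega : a ≤ b)]

-- ===== VERDICT (by name: the statement is the Claim_ definition above) =====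
theorem metodo2_spec : Claim_equal_metodo2 := by
  intro a b _ hpre
  exact metodo2_eq_closed a b hpre
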